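-- pv_equiv track=rewrite | github.com/Kenpachi6003/PT_flask | app/workout_functions.py | filter_video_name
-- ===== SOURCE A (Python) =====
-- def filter_video_name(video_name):
--     delimiters = [
--         "https://causey.s3.us-east-2.amazonaws.com/workout_vids/",
--         ".mov",
--         ".MOV",
--         "_",
--     ]
--     for delimiter in delimiters:
--         if delimiter in video_name:
--             video_name = " ".join(video_name.split(delimiter))
--
--     return video_name.strip()
-- ===== SOURCE B (Python) =====
-- import re
--
-- # One compiled regex alternating over the delimiters in list order; a single
-- # left-to-right scan replaces each delimiter occurrence with a space.
-- _DELIMITERS = [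
--     "https://causey.s3.us-east-2.amazonaws.com/workout_vids/",
--     ".mov",
--     ".MOV",
--     "_",
-- ]
-- _PATTERN = re.compile("|".join(re.escape(d) for d in _DELIMITERS))
--
--
-- def filter_video_name(video_name):
--     return _PATTERN.sub(" ", video_name).strip()
-- ===== Notes on version B (the rewrite author's own statement) =====
-- stated objective: idiomatic
-- what changed: A's four sequential split/join passes (one per delimiter) are replaced by a single compiled regex alternating over the same delimiters in the same order, so one left-to-right scan substitutes a space for every delimiter occurrence.
import Mathlib
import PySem

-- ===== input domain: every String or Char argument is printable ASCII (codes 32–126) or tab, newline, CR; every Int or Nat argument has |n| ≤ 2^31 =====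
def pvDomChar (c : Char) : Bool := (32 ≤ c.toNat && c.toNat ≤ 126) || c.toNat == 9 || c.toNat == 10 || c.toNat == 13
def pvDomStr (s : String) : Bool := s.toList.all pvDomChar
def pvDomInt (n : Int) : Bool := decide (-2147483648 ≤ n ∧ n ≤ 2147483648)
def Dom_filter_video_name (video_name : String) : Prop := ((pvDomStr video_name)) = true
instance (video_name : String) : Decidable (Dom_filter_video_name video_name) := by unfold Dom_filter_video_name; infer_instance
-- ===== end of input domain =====

-- B replaces A's four sequential split/join passes by ONE left-to-right scan (a compiled
-- regex alternating over the same delimiters in the same order); same return value (objective: alternative).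

-- ===== PORT A =====
-- one iteration of A's for-loop: if delimiter in v: v = " ".join(v.split(delimiter))
-- (the .getD [v] default is unreachable: split? is none only for an empty separator, and
-- every delimiter below is nonempty)
def pvStepA (v : String) (d : String) : String :=
  if PySem.Str.isIn d v then PySem.Str.join " " ((PySem.Str.split? v d).getD [v]) else v

def filter_video_name (video_name : String) : String :=
  PySem.Str.strip (List.foldl pvStepA video_name
    ["https://causey.s3.us-east-2.amazonaws.com/workout_vids/", ".mov", ".MOV", "_"])

-- ===== PORT B =====
def pvUrl : List Char := ['h','t','t','p','s',':','/','/','c','a','u','s','e','y','.','s','3','.','u','s','-','e','a','s','t','-','2','.','a','m','a','z','o','n','a','w','s','.','c','o','m','/','w','o','r','k','o','u','t','_','v','i','d','s','/']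

-- hand port of _PATTERN.sub(" ", ·) for the literal alternation url|\.mov|\.MOV|_ :
-- exact because re.sub takes the LEFTMOST match and tries the alternatives in list order
-- at each position, replacing the matched delimiter by one space.
def pvScan : List Char → List Char
  | [] => []
  | c :: t =>
    if pvUrl.isPrefixOf (c :: t) then ' ' :: pvScan (List.drop pvUrl.length (c :: t))
    else if ['.','m','o','v'].isPrefixOf (c :: t) then ' ' :: pvScan (List.drop 4 (c :: t))
    else if ['.','M','O','V'].isPrefixOf (c :: t) then ' ' :: pvScan (List.drop 4 (c :: t))
    else if c = '_' then ' ' :: pvScan t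
    else c :: pvScan t
termination_by l => l.length
decreasing_by all_goals simp [List.length_drop, pvUrl]

def filter_video_name_alt (video_name : String) : String :=
  PySem.Str.strip (String.ofList (pvScan video_name.toList))

-- ===== PRECONDITION & SPEC =====
def Spec_filter_video_name (video_name : String) (out : String) : Prop := out = filter_video_name_alt video_name
instance (video_name : String) (out : String) : Decidable (Spec_filter_video_name video_name out) := by unfold Spec_filter_video_name; infer_instance

-- ===== CLAIM (what is proved, stated in full; the proofs are below) =====
def Claim_equal_filter_video_name : Prop := ∀ (video_name : String), Dom_filter_video_name video_name → Spec_filter_video_name video_name (filter_video_name video_name)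

-- ===== LEMMAS AND PROOFS =====

-- replace every (leftmost-first, non-overlapping) occurrence of d by one space:
-- the list-level value of one pass of A's loop
def pvRep (d : List Char) : List Char → List Char
  | [] => []
  | c :: t =>
    if h : d.isPrefixOf (c :: t) = true ∧ d ≠ [] then
      ' ' :: pvRep d (List.drop d.length (c :: t))
    else c :: pvRep d t
termination_by l => l.length
decreasing_by
  · have : d.length ≥ 1 := by
      cases d with
      | nil => exact absurd rfl h.2
      | cons a t => simp
    simp [List.length_drop]; omega
  · simp

-- the pieces v.split(d) produces
def pvHeadCons (c : Char) : List (List Char) → List (List Char)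
  | [] => [[c]]
  | p :: ps => (c :: p) :: ps

def pvPieces (d : List Char) : List Char → List (List Char)
  | [] => [[]]
  | c :: t =>
    if h : d.isPrefixOf (c :: t) = true ∧ d ≠ [] then
      [] :: pvPieces d (List.drop d.length (c :: t))
    else pvHeadCons c (pvPieces d t)
termination_by l => l.length
decreasing_by
  · have : d.length ≥ 1 := by
      cases d with
      | nil => exact absurd rfl h.2
      | cons a t => simp
    simp [List.length_drop]; omega
  · simp

def pvPre (x : List Char) : List (List Char) → List (List Char)
  | [] => [x]
  | p :: ps => (x ++ p) :: ps

lemma pvPieces_ne_nil (d l : List Char) : pvPieces d l ≠ [] := by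
  cases l with
  | nil => simp [pvPieces]
  | cons c t =>
    rw [pvPieces]
    split
    · simp
    · cases h : pvPieces d t <;> simp [pvHeadCons]

lemma pv_go_inv (d : List Char) (hd : d ≠ []) :
    ∀ (fuel : Nat) (l cur : List Char) (acc : List (List Char)), l.length ≤ fuel →
      PySem.Chars.splitOn.go d fuel l cur acc = acc.reverse ++ pvPre cur.reverse (pvPieces d l) := by
  have hd1 : 1 ≤ d.length := by cases d with | nil => exact absurd rfl hd | cons a t => simp
  intro fuel
  induction fuel with
  | zero =>
    intro l cur acc hl
    have hn : l = [] := List.eq_nil_of_length_eq_zero (Nat.le_zero.mp hl)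
    subst hn
    rw [PySem.Chars.splitOn.go.eq_1]
    simp [pvPieces, pvPre]
  | succ n ih =>
    intro l cur acc hl
    cases l with
    | nil =>
      rw [PySem.Chars.splitOn.go.eq_2 _ _ _ _ (by simp)]
      simp [pvPieces, pvPre]
    | cons c rest =>
      rw [PySem.Chars.splitOn.go.eq_3]
      by_cases hp : d.isPrefixOf (c :: rest) = true
      · rw [if_pos hp]
        have hdrop : (List.drop d.length (c :: rest)).length ≤ n := by
          simp only [List.length_drop, List.length_cons] at *
          omega
        rw [ih _ _ _ hdrop]
        rw [pvPieces, dif_pos ⟨hp, hd⟩]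
        obtain ⟨p, ps, hpp⟩ : ∃ p ps, pvPieces d (List.drop d.length (c :: rest)) = p :: ps := by
          cases h : pvPieces d (List.drop d.length (c :: rest)) with
          | nil => exact absurd h (pvPieces_ne_nil _ _)
          | cons p ps => exact ⟨p, ps, rfl⟩
        rw [hpp]
        simp [pvPre]
      · rw [if_neg hp]
        have hrest : rest.length ≤ n := by simp at hl; omega
        rw [ih _ _ _ hrest]
        rw [pvPieces, dif_neg (by simp [hp])]
        obtain ⟨p, ps, hpp⟩ : ∃ p ps, pvPieces d rest = p :: ps := by
          cases h : pvPieces d rest with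
          | nil => exact absurd h (pvPieces_ne_nil _ _)
          | cons p ps => exact ⟨p, ps, rfl⟩
        rw [hpp]
        simp [pvPre, pvHeadCons]

lemma pv_splitOn_eq (d s : List Char) (hd : d ≠ []) :
    PySem.Chars.splitOn s d = pvPieces d s := by
  rw [PySem.Chars.splitOn, pv_go_inv d hd _ _ _ _ (by omega)]
  obtain ⟨p, ps, hpp⟩ : ∃ p ps, pvPieces d s = p :: ps := by
    cases h : pvPieces d s with
    | nil => exact absurd h (pvPieces_ne_nil _ _)
    | cons p ps => exact ⟨p, ps, rfl⟩
  rw [hpp]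
  simp [pvPre]

lemma pv_join_headCons (c : Char) (p : List Char) (ps : List (List Char)) :
    PySem.Chars.join [' '] (pvHeadCons c (p :: ps)) = c :: PySem.Chars.join [' '] (p :: ps) := by
  cases ps with
  | nil => simp [pvHeadCons, PySem.Chars.join_singleton]
  | cons q qs => simp [pvHeadCons, PySem.Chars.join_cons_cons]

lemma pv_join_pieces (d : List Char) (hd : d ≠ []) :
    ∀ l, PySem.Chars.join [' '] (pvPieces d l) = pvRep d l := by
  have hd1 : 1 ≤ d.length := by cases d with | nil => exact absurd rfl hd | cons a t => simp
  suffices H : ∀ n (l : List Char), l.length ≤ n →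
      PySem.Chars.join [' '] (pvPieces d l) = pvRep d l by
    intro l; exact H l.length l le_rfl
  intro n
  induction n with
  | zero =>
    intro l hl
    have hn : l = [] := List.eq_nil_of_length_eq_zero (Nat.le_zero.mp hl)
    subst hn
    simp [pvPieces, pvRep, PySem.Chars.join_singleton]
  | succ n ih =>
    intro l hl
    cases l with
    | nil => simp [pvPieces, pvRep, PySem.Chars.join_singleton]
    | cons c t =>
      rw [pvPieces, pvRep]
      by_cases h : d.isPrefixOf (c :: t) = true ∧ d ≠ []
      · rw [dif_pos h, dif_pos h]
        obtain ⟨p, ps, hpp⟩ : ∃ p ps, pvPieces d (List.drop d.length (c :: t)) = p :: ps := by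
          cases hq : pvPieces d (List.drop d.length (c :: t)) with
          | nil => exact absurd hq (pvPieces_ne_nil _ _)
          | cons p ps => exact ⟨p, ps, rfl⟩
        rw [hpp, PySem.Chars.join_cons_cons, ← hpp,
          ih _ (by simp only [List.length_drop, List.length_cons] at *; omega)]
        simp
      · rw [dif_neg h, dif_neg h]
        obtain ⟨p, ps, hpp⟩ : ∃ p ps, pvPieces d t = p :: ps := by
          cases hq : pvPieces d t with
          | nil => exact absurd hq (pvPieces_ne_nil _ _)
          | cons p ps => exact ⟨p, ps, rfl⟩
        rw [hpp, pv_join_headCons, ← hpp, ih _ (by simp at hl; omega)]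

lemma pv_rep_of_not_infix (d : List Char) : ∀ l, ¬ d <:+: l → pvRep d l = l := by
  intro l
  induction l with
  | nil => intro _; simp [pvRep]
  | cons c t ih =>
    intro h
    rw [pvRep, dif_neg]
    · rw [ih (fun hi => h (List.infix_cons hi))]
    · intro ⟨hp, _⟩
      exact h (List.isPrefixOf_iff_prefix.mp hp).isInfix

lemma pv_stepA_toList (v d : String) (hd : d.toList ≠ []) :
    (pvStepA v d).toList = pvRep d.toList v.toList := by
  rw [pvStepA]
  by_cases h : PySem.Str.isIn d v = true
  · rw [if_pos h]
    rw [PySem.Str.split?]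
    rw [PySem.Chars.split?, if_neg (by simp [hd])]
    simp only [Option.map_some, Option.getD_some]
    rw [PySem.Str.toList_join]
    have : " ".toList = [' '] := by decide
    rw [this]
    rw [List.map_map]
    have : (String.toList ∘ String.ofList) = id := by
      funext x; simp [String.toList_ofList]
    rw [this, List.map_id]
    rw [pv_splitOn_eq _ _ hd, pv_join_pieces _ hd]
  · rw [if_neg h]
    apply Eq.symm
    apply pv_rep_of_not_infix
    have := PySem.Str.isIn_iff_infix d v
    intro hinf
    exact h (this.mpr hinf)

lemma pv_rep_cons_not (d : List Char) (c : Char) (t : List Char)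
    (h : d.isPrefixOf (c :: t) = false) : pvRep d (c :: t) = c :: pvRep d t := by
  rw [pvRep, dif_neg]
  intro ⟨hp, _⟩
  rw [h] at hp
  exact Bool.false_ne_true hp

lemma pv_rep_prefix (d : List Char) (hd : d ≠ []) (t : List Char) :
    pvRep d (d ++ t) = ' ' :: pvRep d t := by
  cases hD : d with
  | nil => exact absurd hD hd
  | cons a d' =>
    rw [← hD]
    have hcons : d ++ t = a :: (d' ++ t) := by rw [hD]; rfl
    rw [hcons, pvRep, dif_pos]
    · rw [← hcons, List.drop_left' (by rw [hD])]
    · constructor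
      · rw [← hcons]
        exact List.isPrefixOf_iff_prefix.mpr (List.prefix_append d t)
      · exact hd

lemma pv_noNew (d : List Char) :
    ∀ (x : List Char) (e : List Char), ' ' ∉ e → e.isPrefixOf x = false → e.isPrefixOf (pvRep d x) = false := by
  intro x
  induction x using pvRep.induct d with
  | case1 => intro e he h; simpa [pvRep] using h
  | case2 c t hg ih =>
    intro e he h
    rw [pvRep, dif_pos hg]
    cases e with
    | nil => simp at h
    | cons a e' =>
      have ha : (a == ' ') = false := beq_eq_false_iff_ne.mpr (fun hh => he (by simp [hh]))
      simp [List.isPrefixOf, ha]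
  | case3 c t hg ih =>
    intro e he h
    cases e with
    | nil => simp at h
    | cons a e' =>
      rw [pvRep, dif_neg hg]
      simp only [List.isPrefixOf] at h ⊢
      cases hac : a == c with
      | false => simp
      | true =>
        simp only [hac, Bool.true_and] at h ⊢
        exact ih e' (fun hm => he (List.mem_cons_of_mem _ hm)) h

lemma pv_not_prefix_head (a : Char) (d' : List Char) (c : Char) (t : List Char) (h : a ≠ c) :
    (a :: d').isPrefixOf (c :: t) = false := by
  simp [List.isPrefixOf, beq_eq_false_iff_ne.mpr h]

lemma pv_scan_eq : ∀ s, pvScan s =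
    pvRep ['_'] (pvRep ['.','M','O','V'] (pvRep ['.','m','o','v'] (pvRep pvUrl s))) := by
  suffices H : ∀ n (s : List Char), s.length ≤ n → pvScan s =
      pvRep ['_'] (pvRep ['.','M','O','V'] (pvRep ['.','m','o','v'] (pvRep pvUrl s))) by
    intro s; exact H s.length s le_rfl
  intro n
  induction n with
  | zero =>
    intro s hs
    have hn : s = [] := List.eq_nil_of_length_eq_zero (Nat.le_zero.mp hs)
    subst hn
    simp [pvScan, pvRep]
  | succ n ih =>
    intro s hs
    cases s with
    | nil => simp [pvScan, pvRep]
    | cons c t =>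
      rw [pvScan]
      by_cases hU : pvUrl.isPrefixOf (c :: t) = true
      · rw [if_pos hU]
        obtain ⟨t', ht'⟩ := List.isPrefixOf_iff_prefix.mp hU
        have hlt : t'.length ≤ n := by
          have := congrArg List.length ht'
          simp [pvUrl] at this
          simp at hs
          omega
        rw [← ht', List.drop_left, pv_rep_prefix pvUrl (by simp [pvUrl]) t',
          pv_rep_cons_not ['.','m','o','v'] ' ' _ (pv_not_prefix_head _ _ _ _ (by decide)),
          pv_rep_cons_not ['.','M','O','V'] ' ' _ (pv_not_prefix_head _ _ _ _ (by decide)),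
          pv_rep_cons_not ['_'] ' ' _ (pv_not_prefix_head _ _ _ _ (by decide)),
          ih t' hlt]
      · rw [if_neg hU]
        have hU' : pvUrl.isPrefixOf (c :: t) = false := Bool.not_eq_true _ ▸ eq_false_of_ne_true hU
        by_cases hm : (['.','m','o','v']).isPrefixOf (c :: t) = true
        · rw [if_pos hm]
          obtain ⟨t', ht'⟩ := List.isPrefixOf_iff_prefix.mp hm
          have hlt : t'.length ≤ n := by
            have := congrArg List.length ht'
            simp at this hs
            omega
          have hsh : (['.','m','o','v'] : List Char) ++ t' = '.' :: 'm' :: 'o' :: 'v' :: t' := rfl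
          rw [← ht', show (4 : Nat) = (['.','m','o','v'] : List Char).length from rfl,
            List.drop_left, hsh,
            pv_rep_cons_not pvUrl '.' _ (pv_not_prefix_head 'h' _ _ _ (by decide)),
            pv_rep_cons_not pvUrl 'm' _ (pv_not_prefix_head 'h' _ _ _ (by decide)),
            pv_rep_cons_not pvUrl 'o' _ (pv_not_prefix_head 'h' _ _ _ (by decide)),
            pv_rep_cons_not pvUrl 'v' _ (pv_not_prefix_head 'h' _ _ _ (by decide)),
            show ('.' :: 'm' :: 'o' :: 'v' :: pvRep pvUrl t' : List Char)
              = ['.','m','o','v'] ++ pvRep pvUrl t' from rfl,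
            pv_rep_prefix ['.','m','o','v'] (by decide) _,
            pv_rep_cons_not ['.','M','O','V'] ' ' _ (pv_not_prefix_head _ _ _ _ (by decide)),
            pv_rep_cons_not ['_'] ' ' _ (pv_not_prefix_head _ _ _ _ (by decide)),
            ih t' hlt]
        · rw [if_neg hm]
          have hm' : (['.','m','o','v'] : List Char).isPrefixOf (c :: t) = false :=
            Bool.not_eq_true _ ▸ eq_false_of_ne_true hm
          by_cases hM : (['.','M','O','V']).isPrefixOf (c :: t) = true
          · rw [if_pos hM]
            obtain ⟨t', ht'⟩ := List.isPrefixOf_iff_prefix.mp hM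
            have hlt : t'.length ≤ n := by
              have := congrArg List.length ht'
              simp at this hs
              omega
            have hsh : (['.','M','O','V'] : List Char) ++ t' = '.' :: 'M' :: 'O' :: 'V' :: t' := rfl
            rw [← ht', show (4 : Nat) = (['.','M','O','V'] : List Char).length from rfl,
              List.drop_left, hsh,
              pv_rep_cons_not pvUrl '.' _ (pv_not_prefix_head 'h' _ _ _ (by decide)),
              pv_rep_cons_not pvUrl 'M' _ (pv_not_prefix_head 'h' _ _ _ (by decide)),
              pv_rep_cons_not pvUrl 'O' _ (pv_not_prefix_head 'h' _ _ _ (by decide)),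
              pv_rep_cons_not pvUrl 'V' _ (pv_not_prefix_head 'h' _ _ _ (by decide)),
              pv_rep_cons_not ['.','m','o','v'] '.' _ (by simp [List.isPrefixOf]),
              pv_rep_cons_not ['.','m','o','v'] 'M' _ (pv_not_prefix_head _ _ _ _ (by decide)),
              pv_rep_cons_not ['.','m','o','v'] 'O' _ (pv_not_prefix_head _ _ _ _ (by decide)),
              pv_rep_cons_not ['.','m','o','v'] 'V' _ (pv_not_prefix_head _ _ _ _ (by decide)),
              show ('.' :: 'M' :: 'O' :: 'V' :: pvRep ['.','m','o','v'] (pvRep pvUrl t') : List Char)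
                = ['.','M','O','V'] ++ pvRep ['.','m','o','v'] (pvRep pvUrl t') from rfl,
              pv_rep_prefix ['.','M','O','V'] (by decide) _,
              pv_rep_cons_not ['_'] ' ' _ (pv_not_prefix_head _ _ _ _ (by decide)),
              ih t' hlt]
          · rw [if_neg hM]
            have hM' : (['.','M','O','V'] : List Char).isPrefixOf (c :: t) = false :=
              Bool.not_eq_true _ ▸ eq_false_of_ne_true hM
            by_cases hu : c = '_'
            · subst hu
              rw [if_pos rfl,
                pv_rep_cons_not pvUrl '_' _ (pv_not_prefix_head 'h' _ _ _ (by decide)),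
                pv_rep_cons_not ['.','m','o','v'] '_' _ (pv_not_prefix_head _ _ _ _ (by decide)),
                pv_rep_cons_not ['.','M','O','V'] '_' _ (pv_not_prefix_head _ _ _ _ (by decide)),
                show ('_' :: pvRep ['.','M','O','V'] (pvRep ['.','m','o','v'] (pvRep pvUrl t)) : List Char)
                  = ['_'] ++ pvRep ['.','M','O','V'] (pvRep ['.','m','o','v'] (pvRep pvUrl t)) from rfl,
                pv_rep_prefix ['_'] (by decide) _,
                ih t (by simp at hs; omega)]
            · rw [if_neg hu]
              have hu' : (['_'] : List Char).isPrefixOf (c :: t) = false :=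
                pv_not_prefix_head '_' [] c t (fun h => hu h.symm)
              have e1 : pvRep pvUrl (c :: t) = c :: pvRep pvUrl t :=
                pv_rep_cons_not _ _ _ hU'
              have hm2 : (['.','m','o','v'] : List Char).isPrefixOf (c :: pvRep pvUrl t) = false :=
                e1 ▸ pv_noNew pvUrl (c :: t) ['.','m','o','v'] (by decide) hm'
              have e2 : pvRep ['.','m','o','v'] (c :: pvRep pvUrl t)
                  = c :: pvRep ['.','m','o','v'] (pvRep pvUrl t) :=
                pv_rep_cons_not _ _ _ hm2
              have hM2 : (['.','M','O','V'] : List Char).isPrefixOf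
                  (c :: pvRep ['.','m','o','v'] (pvRep pvUrl t)) = false := by
                have h0 := pv_noNew ['.','m','o','v'] _ ['.','M','O','V'] (by decide)
                  (pv_noNew pvUrl (c :: t) ['.','M','O','V'] (by decide) hM')
                rwa [e1, e2] at h0
              have e3 : pvRep ['.','M','O','V'] (c :: pvRep ['.','m','o','v'] (pvRep pvUrl t))
                  = c :: pvRep ['.','M','O','V'] (pvRep ['.','m','o','v'] (pvRep pvUrl t)) :=
                pv_rep_cons_not _ _ _ hM2
              have hu2 : (['_'] : List Char).isPrefixOf
                  (c :: pvRep ['.','M','O','V'] (pvRep ['.','m','o','v'] (pvRep pvUrl t))) = false := by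
                have h0 := pv_noNew ['.','M','O','V'] _ ['_'] (by decide)
                  (pv_noNew ['.','m','o','v'] _ ['_'] (by decide)
                    (pv_noNew pvUrl (c :: t) ['_'] (by decide) hu'))
                rwa [e1, e2, e3] at h0
              have e4 : pvRep ['_'] (c :: pvRep ['.','M','O','V'] (pvRep ['.','m','o','v'] (pvRep pvUrl t)))
                  = c :: pvRep ['_'] (pvRep ['.','M','O','V'] (pvRep ['.','m','o','v'] (pvRep pvUrl t))) :=
                pv_rep_cons_not _ _ _ hu2
              rw [e1, e2, e3, e4, ih t (by simp at hs; omega)]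

-- ===== VERDICT (by name: the statement is the Claim_ definition above) =====
theorem filter_video_name_spec : Claim_equal_filter_video_name := by
  unfold Claim_equal_filter_video_name
  intro v _
  unfold Spec_filter_video_name filter_video_name filter_video_name_alt
  simp only [List.foldl]
  have h : (pvStepA (pvStepA (pvStepA (pvStepA v
        "https://causey.s3.us-east-2.amazonaws.com/workout_vids/") ".mov") ".MOV") "_").toList
      = (String.ofList (pvScan v.toList)).toList := by
    rw [pv_stepA_toList _ _ (by decide), pv_stepA_toList _ _ (by decide),
      pv_stepA_toList _ _ (by decide), pv_stepA_toList _ _ (by decide),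
      String.toList_ofList, pv_scan_eq]
    simp only [show "https://causey.s3.us-east-2.amazonaws.com/workout_vids/".toList = pvUrl from by decide,
      show ".mov".toList = ['.','m','o','v'] from by decide,
      show ".MOV".toList = ['.','M','O','V'] from by decide,
      String.toList_ofList]
  rw [PySem.Str.strip, PySem.Str.strip, h]
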